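-- pv_equiv track=rewrite | github.com/deni-13/Algoritma-Data-Structures | python_challenges/2-medium/2 (2).py | frequencyDict
-- ===== SOURCE A (Python) =====
-- def frequencyDict(string):
--
--     # Oncelikle harfleri kucultup, bosluklari siliyoruz.
--     string = string.lower().replace(" ", "")
--
--     # counter(sayac) dictionary kuruyoruz
--     counter = {}
--
--     # final return icin string kuruyoruz.
--     newWord = ""
--
--     # harflere ulasip key, value olarak dict e ekliyoruz
--     for letter in string:
--         # eger gorulmusse 1 ekliyoruz.
--         if letter in counter:
--             counter[letter] += 1
--         # gorulmemisse 1 olarak kayda geciyor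
--         else:
--             counter[letter] = 1
--
--     # dict' teki key, value degerini string e ceviriyoruz.
--     for letter in counter:
--         newWord += str(counter[letter]) + (letter)
--
--     # final stringimizi return yapiyoruz.
--     return newWord
-- ===== SOURCE B (Python) =====
-- def frequencyDict(string):
--     # Repeatedly strip out all copies of the first remaining letter:
--     # each round emits its multiplicity and removes it, shrinking the list.
--     s = list(string.lower().replace(" ", ""))
--     out = ""
--     while s:
--         c = s[0]
--         rest = [ch for ch in s if ch != c]
--         out += str(len(s) - len(rest)) + c
--         s = rest
--     return out
-- ===== Notes on version B (the rewrite author's own statement) =====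
-- stated objective: alternative
-- what changed: Replaces A's single-pass frequency dict plus second emit loop by a dict-free shrink loop: repeatedly take the first remaining letter, partition it out of the list, and emit len(s)-len(rest) as its count.
import Mathlib
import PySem

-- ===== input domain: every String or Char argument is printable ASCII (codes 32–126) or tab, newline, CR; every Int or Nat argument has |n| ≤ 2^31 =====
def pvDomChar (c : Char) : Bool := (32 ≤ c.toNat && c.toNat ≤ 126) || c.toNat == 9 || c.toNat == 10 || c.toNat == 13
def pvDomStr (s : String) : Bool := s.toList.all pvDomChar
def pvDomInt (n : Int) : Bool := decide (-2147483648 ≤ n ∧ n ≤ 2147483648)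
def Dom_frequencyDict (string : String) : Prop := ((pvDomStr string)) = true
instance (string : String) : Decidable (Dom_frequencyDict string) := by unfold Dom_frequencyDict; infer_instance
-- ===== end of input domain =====

-- B drops A's frequency dict entirely: a shrink loop takes the first remaining letter, partitions it out and emits len(s)-len(rest) as its count (alternative decomposition, same output).

-- ===== PORT A =====
def frequencyDict (string : String) : String :=
  -- string = string.lower().replace(" ", "")
  let s : List Char := PySem.Chars.replace (PySem.Chars.lower string.toList) [' '] []
  -- counter loop: if letter in counter: +=1 else: = 1
  let counter : PySem.Dict Char Int :=
    s.foldl (fun d letter =>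
      if d.contains letter then d.insert letter (d.getD letter 0 + 1)
      else d.insert letter 1) PySem.Dict.empty
  -- for letter in counter: newWord += str(counter[letter]) + letter   (letter ∈ keys, so counter[letter] = getD letter 0)
  String.ofList (counter.keys.foldl
    (fun newWord letter => newWord ++ (PySem.Int.toChars (counter.getD letter 0) ++ [letter])) [])

-- ===== PORT B =====
-- the while loop of Source B: each round emits str(len(s)-len(rest)) + c and continues on rest
def freqGo (s : List Char) (out : List Char) : List Char :=
  match s with
  | [] => out
  | c :: t =>
    let rest := (c :: t).filter (fun ch => ch != c)
    freqGo rest (out ++ PySem.Int.toChars (((c :: t).length : Int) - (rest.length : Int)) ++ [c])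
termination_by s.length
decreasing_by
  simp only [List.filter]
  simp only [bne_self_eq_false, List.length_cons]
  exact Nat.lt_succ_of_le (List.length_filter_le _ _)

def frequencyDict_alt (string : String) : String :=
  let s : List Char := PySem.Chars.replace (PySem.Chars.lower string.toList) [' '] []
  String.ofList (freqGo s [])

-- ===== PRECONDITION & SPEC =====
def Spec_frequencyDict (string : String) (out : String) : Prop := out = frequencyDict_alt string
instance (string : String) (out : String) : Decidable (Spec_frequencyDict string out) := by unfold Spec_frequencyDict; infer_instance

-- ===== CLAIM =====
def Claim_equal_frequencyDict : Prop := ∀ (string : String), Dom_frequencyDict string → Spec_frequencyDict string (frequencyDict string)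

-- ===== LEMMAS AND PROOFS =====

-- A's counter-building loop is collections.Counter
lemma counter_loop_eq (s : List Char) :
    s.foldl (fun d letter =>
      if d.contains letter then d.insert letter (d.getD letter 0 + 1)
      else d.insert letter 1) PySem.Dict.empty = PySem.Dict.counter s := by
  rw [← PySem.Dict.foldl_insert_getD_add_one_eq_counter]
  apply PySem.List.foldl_congr_mem
  intro d letter _
  by_cases h : d.contains letter = true
  · simp [h]
  · simp only [h, if_neg Bool.false_ne_true]
    rw [PySem.Dict.getD_of_not_contains d 0 (by simpa using h)]; norm_num

-- the common shape both programs produce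
def spine (s : List Char) : List Char :=
  (PySem.Set.ofList s).flatMap (fun c => PySem.Int.toChars ((s.count c : Int)) ++ [c])

-- A equals the spine
lemma A_eq_spine (string : String) :
    frequencyDict string
      = String.ofList (spine (PySem.Chars.replace (PySem.Chars.lower string.toList) [' '] [])) := by
  unfold frequencyDict spine
  simp only [counter_loop_eq, PySem.Dict.keys_counter, PySem.Dict.getD_counter,
    PySem.List.foldl_append_eq_flatMap, List.nil_append]

-- filtering out an element already in the accumulator does not change the fold
lemma foldl_add_filter (c : Char) :
    ∀ (t : List Char) (acc : PySem.Set Char), c ∈ acc →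
      t.foldl PySem.Set.add acc = (t.filter (fun ch => ch != c)).foldl PySem.Set.add acc := by
  intro t
  induction t with
  | nil => intro acc _; rfl
  | cons a t ih =>
    intro acc hc
    by_cases ha : a = c
    · subst ha
      have hcon : PySem.Set.contains acc a = true := (PySem.Set.contains_iff acc a).mpr hc
      simp only [List.filter, bne_self_eq_false, List.foldl_cons]
      rw [show PySem.Set.add acc a = acc by simp [PySem.Set.add, hc]]
      exact ih acc hc
    · have : (a != c) = true := by simpa using ha
      simp only [List.filter, this, List.foldl_cons]
      exact ih _ (by unfold PySem.Set.add; split <;> simp [hc])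

-- pulling a fresh head out of the fold
lemma foldl_add_cons_out (c : Char) :
    ∀ (u : List Char) (acc : PySem.Set Char), c ∉ u →
      u.foldl PySem.Set.add (c :: acc) = c :: u.foldl PySem.Set.add acc := by
  intro u
  induction u with
  | nil => intro acc _; rfl
  | cons a u ih =>
    intro acc hc
    have hac : ¬ a = c := fun h => hc (h ▸ List.mem_cons_self)
    have hcontains : PySem.Set.contains (c :: acc) a = PySem.Set.contains acc a := by
      simp [PySem.Set.contains, List.contains_eq_mem, hac]
    have hc' : c ∉ u := fun hm => hc (List.mem_cons_of_mem _ hm)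
    simp only [List.foldl_cons]
    unfold PySem.Set.add
    rw [hcontains]
    by_cases h : acc.contains a = true
    · simp only [h, if_pos]
      exact ih acc hc'
    · simp only [h, Bool.false_eq_true]
      rw [show (c :: acc) ++ [a] = c :: (acc ++ [a]) from rfl]
      exact ih (acc ++ [a]) hc'

-- dedup decomposition: first occurrence pulls to the front, rest is deduped with c removed
lemma ofList_cons_filter (c : Char) (t : List Char) :
    PySem.Set.ofList (c :: t) = c :: PySem.Set.ofList (t.filter (fun ch => ch != c)) := by
  unfold PySem.Set.ofList
  simp only [List.foldl_cons]
  rw [show PySem.Set.add PySem.Set.empty c = c :: ([] : List Char) from rfl]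
  rw [foldl_add_filter c t (c :: []) (by simp)]
  rw [foldl_add_cons_out c _ [] (by simp)]
  rfl

-- counts are preserved by removing a different letter
lemma count_filter_ne (d c : Char) (h : d ≠ c) (t : List Char) :
    (t.filter (fun ch => ch != c)).count d = t.count d := by
  induction t with
  | nil => rfl
  | cons a t ih =>
    by_cases ha : a = c
    · subst ha
      simp only [List.filter, bne_self_eq_false]
      rw [ih, List.count_cons]
      simp [Ne.symm h]
    · have : (a != c) = true := by simpa using ha
      simp only [List.filter, this, List.count_cons, ih]

-- count + length of the complement partition = length
lemma count_add_length_filter (c : Char) (l : List Char) :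
    l.count c + (l.filter (fun ch => ch != c)).length = l.length := by
  induction l with
  | nil => rfl
  | cons a l ih =>
    by_cases ha : a = c
    · subst ha
      simp only [List.filter, bne_self_eq_false, List.count_cons, List.length_cons]
      simp
      omega
    · have hb : (a != c) = true := by simpa using ha
      simp only [List.filter, hb, List.count_cons, List.length_cons]
      simp [ha]
      omega

-- the emitted number: len(s) - len(rest) is the multiplicity of c
lemma length_sub_filter (c : Char) (t : List Char) :
    (((c :: t).length : Int) - ((t.filter (fun ch => ch != c)).length : Int))
      = (((c :: t).count c : Nat) : Int) := by
  have h := count_add_length_filter c (c :: t)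
  have hfil : (c :: t).filter (fun ch => ch != c) = t.filter (fun ch => ch != c) := by
    simp [List.filter]
  rw [hfil] at h
  omega

-- B's loop computes the spine
lemma freqGo_eq_spine_aux : ∀ (n : Nat) (s : List Char), s.length ≤ n →
    ∀ (out : List Char), freqGo s out = out ++ spine s := by
  intro n
  induction n with
  | zero =>
    intro s hs out
    have : s = [] := List.eq_nil_of_length_eq_zero (Nat.le_zero.mp hs)
    subst this
    simp [freqGo, spine, PySem.Set.ofList]
  | succ n ih =>
    intro s hs out
    cases s with
    | nil => simp [freqGo, spine, PySem.Set.ofList]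
    | cons c t =>
      rw [freqGo]
      have hfil : (c :: t).filter (fun ch => ch != c) = t.filter (fun ch => ch != c) := by
        simp [List.filter]
      simp only [hfil]
      have hlen : (t.filter (fun ch => ch != c)).length ≤ n := by
        have h1 := List.length_filter_le (fun ch => ch != c) t
        have h2 : (c :: t).length ≤ n + 1 := hs
        simp only [List.length_cons] at h2
        omega
      rw [ih _ hlen]
      have hspine : spine (c :: t)
          = (PySem.Int.toChars (((c :: t).count c : Nat) : Int) ++ [c])
            ++ spine (t.filter (fun ch => ch != c)) := by
        unfold spine
        rw [ofList_cons_filter]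
        rw [List.flatMap_cons]
        congr 1
        unfold List.flatMap
        congr 1
        apply List.map_congr_left
        intro d hd
        have hdmem : d ∈ t.filter (fun ch => ch != c) :=
          (PySem.Set.mem_ofList _ _).mp hd
        have hdc : d ≠ c := by
          have := List.of_mem_filter hdmem
          simpa using this
        rw [count_filter_ne d c hdc, List.count_cons]
        simp [Ne.symm hdc]
      rw [hspine, length_sub_filter]
      simp

lemma freqGo_eq_spine (s : List Char) (out : List Char) :
    freqGo s out = out ++ spine s :=
  freqGo_eq_spine_aux s.length s (Nat.le_refl _) out

-- ===== VERDICT =====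
theorem frequencyDict_spec : Claim_equal_frequencyDict := by
  intro string _
  unfold Spec_frequencyDict frequencyDict_alt
  rw [A_eq_spine]
  simp only [freqGo_eq_spine, List.nil_append]
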